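-- pv_equiv track=rewrite | github.com/Gsam0612/Mitigating-Hallucination-and-Perception-Error | src/mitigation/cot_prompting.py | extract_cot_steps
-- ===== SOURCE A (Python) =====
-- from typing import Dict, List, Optional
--
-- def extract_cot_steps(response: str) -> Dict[str, str]:
--     """
--     Parse a CoT response into individual steps.
--
--     Returns:
--         dict mapping step names to their content.
--     """
--     steps = {}
--     current_step = None
--     current_content = []
--
--     for line in response.split("\n"):
--         line_lower = line.lower().strip()
--
--         # Check for step markers
--         if any(marker in line_lower for marker in
--                ["step 1", "step 2", "step 3", "step 4",
--                 "verify", "describe", "relate", "answer",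
--                 "enumeration", "attribute", "spatial", "final"]):
--             if current_step:
--                 steps[current_step] = "\n".join(current_content).strip()
--             current_step = line.strip()
--             current_content = []
--         else:
--             current_content.append(line)
--
--     if current_step:
--         steps[current_step] = "\n".join(current_content).strip()
--
--     return steps
-- ===== SOURCE B (Python) =====
-- _MARKERS = ["step 1", "step 2", "step 3", "step 4",
--             "verify", "describe", "relate", "answer",
--             "enumeration", "attribute", "spatial", "final"]
--
--
-- def _is_marker(line):
--     low = line.lower().strip()
--     return any(m in low for m in _MARKERS)
--
--
-- def extract_cot_steps(response):
--     """Segment scan: find each marker line, then grab the block up to the next one."""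
--     lines = response.split("\n")
--     n = len(lines)
--     steps = {}
--     i = 0
--     while i < n and not _is_marker(lines[i]):
--         i += 1
--     while i < n:
--         j = i + 1
--         while j < n and not _is_marker(lines[j]):
--             j += 1
--         steps[lines[i].strip()] = "\n".join(lines[i + 1:j]).strip()
--         i = j
--     return steps
-- ===== Notes on version B (the rewrite author's own statement) =====
-- stated objective: alternative
-- what changed: Replaces A's single-pass state machine (pending current_step/current_content flushed at each marker and at EOF) with a two-level segment scan: locate each marker line, scan forward to the next marker, and assign the slice between them as that step's content.
import Mathlib
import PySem

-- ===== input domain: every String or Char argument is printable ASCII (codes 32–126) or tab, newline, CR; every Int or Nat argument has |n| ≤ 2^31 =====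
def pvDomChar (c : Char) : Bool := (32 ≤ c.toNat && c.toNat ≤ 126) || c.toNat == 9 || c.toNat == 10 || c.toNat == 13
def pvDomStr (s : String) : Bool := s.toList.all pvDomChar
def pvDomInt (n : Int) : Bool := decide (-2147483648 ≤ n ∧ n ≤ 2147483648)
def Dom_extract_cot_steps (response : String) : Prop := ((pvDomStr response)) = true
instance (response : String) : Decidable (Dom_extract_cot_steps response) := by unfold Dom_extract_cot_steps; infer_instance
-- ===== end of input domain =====

-- B replaces A's flush-as-you-go state machine by a two-level segment scan (find each marker
-- line, then grab the block up to the next marker); same results, alternative decomposition.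

-- ===== PORT A =====
def pvMarkersA : List String :=
  ["step 1", "step 2", "step 3", "step 4",
   "verify", "describe", "relate", "answer",
   "enumeration", "attribute", "spatial", "final"]

-- the flush 'if current_step: steps[current_step] = "\n".join(current_content).strip()'
-- (Python truthiness: None and the empty string are both falsy)
def pvFlushA (steps : PySem.Dict String String) (cur : Option String)
    (content : List String) : PySem.Dict String String :=
  match cur with
  | some k =>
      if k.toList ≠ [] then
        steps.insert k (PySem.Str.strip (PySem.Str.join "\n" content))
      else steps
  | none => steps

-- one iteration of A's 'for line in response.split("\n")' loop
def pvStepA (st : PySem.Dict String String × Option String × List String) (line : String) :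
    PySem.Dict String String × Option String × List String :=
  let line_lower := PySem.Str.strip (PySem.Str.lower line)
  if pvMarkersA.any (fun m => PySem.Str.isIn m line_lower) then
    (pvFlushA st.1 st.2.1 st.2.2, some (PySem.Str.strip line), [])
  else
    (st.1, st.2.1, st.2.2 ++ [line])

def extract_cot_steps (response : String) : List (String × String) :=
  let st := ((PySem.Str.split? response "\n").getD []).foldl pvStepA (PySem.Dict.empty, none, [])
  (pvFlushA st.1 st.2.1 st.2.2).items

-- ===== PORT B =====
def pvMarkersB : List String :=
  ["step 1", "step 2", "step 3", "step 4",
   "verify", "describe", "relate", "answer",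
   "enumeration", "attribute", "spatial", "final"]

-- Source B's _is_marker
def pvIsMarkerB (line : String) : Bool :=
  let low := PySem.Str.strip (PySem.Str.lower line)
  pvMarkersB.any (fun m => PySem.Str.isIn m low)

-- 'while j < n and not _is_marker(lines[j]): j += 1' (also the initial scan, started at 0)
def pvScanB (lines : List String) (j : Nat) : Nat :=
  if h : j < lines.length then
    if pvIsMarkerB lines[j] then j else pvScanB lines (j + 1)
  else j
termination_by lines.length - j

-- needed only so that pvOuterB's outer while loop is seen to terminate
theorem pvScanB_ge (lines : List String) (j : Nat) : j ≤ pvScanB lines j := by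
  unfold pvScanB
  split
  · split
    · exact Nat.le_refl j
    · exact Nat.le_of_succ_le (pvScanB_ge lines (j + 1))
  · exact Nat.le_refl j
termination_by lines.length - j

-- Source B's outer 'while i < n' loop
def pvOuterB (lines : List String) (i : Nat) (steps : PySem.Dict String String) :
    PySem.Dict String String :=
  if h : i < lines.length then
    let j := pvScanB lines (i + 1)
    pvOuterB lines j
      (steps.insert (PySem.Str.strip lines[i])
        (PySem.Str.strip (PySem.Str.join "\n"
          (PySem.List.slice lines (some ((i : Int) + 1)) (some (j : Int))))))
  else steps
termination_by lines.length - i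
decreasing_by have := pvScanB_ge lines (i + 1); omega

def extract_cot_steps_alt (response : String) : List (String × String) :=
  let lines := (PySem.Str.split? response "\n").getD []
  (pvOuterB lines (pvScanB lines 0) PySem.Dict.empty).items

-- ===== PRECONDITION & SPEC =====
def Spec_extract_cot_steps (response : String) (out : List (String × String)) : Prop := out = extract_cot_steps_alt response
instance (response : String) (out : List (String × String)) : Decidable (Spec_extract_cot_steps response out) := by unfold Spec_extract_cot_steps; infer_instance

-- ===== CLAIM (what is proved, stated in full; the proofs are below) =====
def Claim_equal_extract_cot_steps : Prop := ∀ (response : String), Dom_extract_cot_steps response → Spec_extract_cot_steps response (extract_cot_steps response)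

-- ===== LEMMAS AND PROOFS =====

-- common reference shape: consume one marker line plus the non-marker block after it, repeat
def pvSeg (lines : List String) (d : PySem.Dict String String) : PySem.Dict String String :=
  match lines with
  | [] => d
  | l :: ls =>
    pvSeg (ls.dropWhile (fun x => !pvIsMarkerB x))
      (d.insert (PySem.Str.strip l)
        (PySem.Str.strip (PySem.Str.join "\n" (ls.takeWhile (fun x => !pvIsMarkerB x)))))
termination_by lines.length
decreasing_by
  exact Nat.lt_succ_of_le (List.length_dropWhile_le _ _)

theorem pvSeg_nil (d : PySem.Dict String String) : pvSeg [] d = d := by rw [pvSeg]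

theorem pvSeg_cons (l : String) (ls : List String) (d : PySem.Dict String String) :
    pvSeg (l :: ls) d
      = pvSeg (ls.dropWhile (fun x => !pvIsMarkerB x))
          (d.insert (PySem.Str.strip l)
            (PySem.Str.strip (PySem.Str.join "\n" (ls.takeWhile (fun x => !pvIsMarkerB x))))) := by
  rw [pvSeg]

theorem pv_isspace_lowerChar (c : Char) :
    PySem.Chars.isspace (PySem.Chars.lowerChar c) = PySem.Chars.isspace c := by
  simp only [PySem.Chars.lowerChar]
  split_ifs with h
  · simp only [PySem.Chars.isupper, Bool.and_eq_true, decide_eq_true_eq] at h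
    have h1 : 65 ≤ c.toNat := h.1
    have h2 : c.toNat ≤ 90 := h.2
    have hv : (c.toNat + 32).isValidChar := Or.inl (by omega)
    have ht : (Char.ofNat (c.toNat + 32)).toNat = c.toNat + 32 := by
      rw [Char.toNat_ofNat, if_pos hv]
    have e1 : PySem.Chars.isspace (Char.ofNat (c.toNat + 32)) = false := by
      simp only [PySem.Chars.isspace, ht, Bool.or_eq_false_iff, Bool.and_eq_false_iff,
        decide_eq_false_iff_not]
      omega
    have e2 : PySem.Chars.isspace c = false := by
      simp only [PySem.Chars.isspace, Bool.or_eq_false_iff, Bool.and_eq_false_iff,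
        decide_eq_false_iff_not]
      omega
    rw [e1, e2]
  · rfl

theorem pv_strip_lower (cs : List Char) :
    PySem.Chars.strip (PySem.Chars.lower cs) = PySem.Chars.lower (PySem.Chars.strip cs) := by
  have hcomp : (PySem.Chars.isspace ∘ PySem.Chars.lowerChar) = PySem.Chars.isspace := by
    funext c; exact pv_isspace_lowerChar c
  simp only [PySem.Chars.strip, PySem.Chars.lstrip, PySem.Chars.rstrip, PySem.Chars.lower,
    ← List.map_reverse, List.dropWhile_map, hcomp]

-- a marker line strips to a nonempty string (so A's truthiness test on current_step passes)
theorem pv_marker_strip_ne (l : String) (h : pvIsMarkerB l = true) :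
    (PySem.Str.strip l).toList ≠ [] := by
  simp only [pvIsMarkerB, List.any_eq_true] at h
  obtain ⟨m, hm, hin⟩ := h
  have hmne : m.toList ≠ [] := by
    fin_cases hm <;> decide
  have hinf := (PySem.Str.isIn_iff_infix m _).mp hin
  have hlow : (PySem.Str.strip (PySem.Str.lower l)).toList ≠ [] := by
    intro hnil
    rw [hnil] at hinf
    exact hmne (List.eq_nil_of_infix_nil hinf)
  rw [PySem.Str.toList_strip, PySem.Str.toList_lower, pv_strip_lower] at hlow
  rw [PySem.Str.toList_strip]
  intro hnil
  rw [hnil] at hlow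
  exact hlow rfl

-- A's inline marker test is B's _is_marker
theorem pv_condA_eq (line : String) :
    (pvMarkersA.any fun m =>
      PySem.Str.isIn m (PySem.Str.strip (PySem.Str.lower line))) = pvIsMarkerB line := rfl

-- the inner while loop scans exactly past the non-marker block
theorem pvScanB_eq (lines : List String) (j : Nat) :
    pvScanB lines j = j + ((lines.drop j).takeWhile (fun x => !pvIsMarkerB x)).length := by
  unfold pvScanB
  split
  · rename_i h
    rw [List.drop_eq_getElem_cons h, List.takeWhile_cons]
    split
    · rename_i hm
      simp [hm]
    · rename_i hm
      rw [Bool.not_eq_true] at hm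
      rw [pvScanB_eq lines (j + 1)]
      simp [hm]
      omega
  · rename_i h
    rw [List.drop_eq_nil_of_le (by omega)]
    simp
termination_by lines.length - j

-- the outer while loop from index i is pvSeg on the suffix from i
theorem pvOuterB_eq (lines : List String) (i : Nat) (d : PySem.Dict String String) :
    pvOuterB lines i d = pvSeg (lines.drop i) d := by
  unfold pvOuterB
  split
  · rename_i h
    have hdrop := List.drop_eq_getElem_cons h
    have hscan := pvScanB_eq lines (i + 1)
    set tl := (lines.drop (i + 1)).takeWhile (fun x => !pvIsMarkerB x) with htl
    have hsl : PySem.List.slice lines (some ((i : Int) + 1)) (some ((pvScanB lines (i + 1) : Nat) : Int))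
        = tl := by
      have hcast : ((i : Int) + 1) = ((i + 1 : Nat) : Int) := by push_cast; ring
      have hcast2 : ((pvScanB lines (i + 1) : Nat) : Int) = ((i + 1 : Nat) : Int) + (tl.length : Int) := by
        rw [hscan]; push_cast; ring
      rw [hcast, hcast2, PySem.List.slice_natCast_add]
      -- take (length of the takeWhile-prefix) = the takeWhile-prefix
      conv_lhs => rw [← List.takeWhile_append_dropWhile (p := fun x => !pvIsMarkerB x)
        (l := lines.drop (i + 1))]
      exact List.take_left
    have hdw : lines.drop (pvScanB lines (i + 1))
        = (lines.drop (i + 1)).dropWhile (fun x => !pvIsMarkerB x) := by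
      rw [hscan, ← List.drop_drop]
      conv_lhs => rw [← List.takeWhile_append_dropWhile (p := fun x => !pvIsMarkerB x)
        (l := lines.drop (i + 1))]
      exact List.drop_left
    rw [pvOuterB_eq lines (pvScanB lines (i + 1)) _, hdw, hsl, hdrop, pvSeg_cons]
  · rename_i h
    rw [List.drop_eq_nil_of_le (by omega), pvSeg_nil]
termination_by lines.length - i
decreasing_by have := pvScanB_ge lines (i + 1); omega

-- A's loop, run from a live current step k with content c, then flushed at the end
theorem pvFoldA_some (lines : List String) (k : String) (hk : k.toList ≠ [])
    (c : List String) (d : PySem.Dict String String) :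
    (fun st => (pvFlushA st.1 st.2.1 st.2.2 : PySem.Dict String String))
        (lines.foldl pvStepA (d, some k, c))
      = pvSeg (lines.dropWhile (fun x => !pvIsMarkerB x))
          (d.insert k (PySem.Str.strip (PySem.Str.join "\n"
            (c ++ lines.takeWhile (fun x => !pvIsMarkerB x))))) := by
  induction lines generalizing k c d with
  | nil =>
      simp [pvFlushA, hk, pvSeg_nil]
  | cons l ls ih =>
      by_cases hm : pvIsMarkerB l = true
      · have hstep : pvStepA (d, some k, c) l
            = (d.insert k (PySem.Str.strip (PySem.Str.join "\n" c)),
               some (PySem.Str.strip l), []) := by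
          simp only [pvStepA, pv_condA_eq, hm, if_true, pvFlushA, if_pos hk]
        rw [List.foldl_cons, hstep,
          ih (PySem.Str.strip l) (pv_marker_strip_ne l hm) [] _]
        simp only [List.dropWhile_cons, List.takeWhile_cons, hm, Bool.not_true,
          List.nil_append, List.append_nil, if_false, Bool.false_eq_true]
        rw [pvSeg_cons]
      · rw [Bool.not_eq_true] at hm
        have hstep : pvStepA (d, some k, c) l = (d, some k, c ++ [l]) := by
          simp only [pvStepA, pv_condA_eq, hm, Bool.false_eq_true, if_false]
        rw [List.foldl_cons, hstep, ih k hk (c ++ [l]) d]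
        simp [hm]

-- A's loop from the initial (no current step) state drops the pre-marker prefix
theorem pvFoldA_none (lines : List String) (c : List String) (d : PySem.Dict String String) :
    (fun st => (pvFlushA st.1 st.2.1 st.2.2 : PySem.Dict String String))
        (lines.foldl pvStepA (d, none, c))
      = pvSeg (lines.dropWhile (fun x => !pvIsMarkerB x)) d := by
  induction lines generalizing c with
  | nil => simp [pvFlushA, pvSeg_nil]
  | cons l ls ih =>
      by_cases hm : pvIsMarkerB l = true
      · have hstep : pvStepA (d, none, c) l = (d, some (PySem.Str.strip l), []) := by
          simp only [pvStepA, pv_condA_eq, hm, if_true, pvFlushA]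
        rw [List.foldl_cons, hstep,
          pvFoldA_some ls (PySem.Str.strip l) (pv_marker_strip_ne l hm) [] d]
        simp only [List.dropWhile_cons, hm, Bool.not_true, List.nil_append, if_false,
          Bool.false_eq_true]
        rw [pvSeg_cons]
      · rw [Bool.not_eq_true] at hm
        have hstep : pvStepA (d, none, c) l = (d, none, c ++ [l]) := by
          simp only [pvStepA, pv_condA_eq, hm, Bool.false_eq_true, if_false]
        rw [List.foldl_cons, hstep, ih (c ++ [l])]
        simp [hm]

-- ===== VERDICT (by name: the statement is the Claim_ definition above) =====
-- xs.drop (takeWhile-prefix length) is dropWhile (no Mathlib lemma states this directly)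
theorem pv_drop_takeWhile_length {α : Type} (p : α → Bool) (xs : List α) :
    xs.drop (xs.takeWhile p).length = xs.dropWhile p := by
  induction xs with
  | nil => simp
  | cons x xs ih =>
      by_cases h : p x = true <;>
        simp [h, ih]

theorem extract_cot_steps_spec : Claim_equal_extract_cot_steps := by
  intro response _
  show extract_cot_steps response = extract_cot_steps_alt response
  have key : ∀ lines : List String,
      (pvFlushA (lines.foldl pvStepA (PySem.Dict.empty, none, [])).1
          (lines.foldl pvStepA (PySem.Dict.empty, none, [])).2.1
          (lines.foldl pvStepA (PySem.Dict.empty, none, [])).2.2).items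
        = (pvOuterB lines (pvScanB lines 0) PySem.Dict.empty).items := by
    intro lines
    rw [pvOuterB_eq, pvScanB_eq, Nat.zero_add, List.drop_zero]
    rw [pv_drop_takeWhile_length]
    exact congrArg PySem.Dict.items (pvFoldA_none lines [] PySem.Dict.empty)
  exact key ((PySem.Str.split? response "\n").getD [])
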